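-- pv_equiv track=rewrite | github.com/charlesgiry/advent_of_code | y2022/days/day01.py | d1parse
-- ===== SOURCE A (Python) =====
-- def d1parse(data):
--     """
--
--     """
--     elves = []
--     elf = []
--     for line in data:
--         if line != '':
--             elf.append(int(line))
--         else:
--             elves.append(elf.copy())
--             elf = []
--     return elves
-- ===== SOURCE B (Python) =====
-- def d1parse(data):
--     # Flatten/reshape strategy: parse all numbers once, record the run length of
--     # each blank-terminated group, then cut the flat number list into groups.
--     # (A trailing group with no blank after it is never emitted, as in A.)
--     nums = [int(l) for l in data if l != '']
--     sizes = []
--     run = 0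
--     for l in data:
--         if l == '':
--             sizes.append(run)
--             run = 0
--         else:
--             run += 1
--     res = []
--     pos = 0
--     for s in sizes:
--         res.append(nums[pos:pos + s])
--         pos += s
--     return res
-- ===== Notes on version B (the rewrite author's own statement) =====
-- stated objective: alternative
-- what changed: A makes one pass holding the current group's parsed values in an accumulator list flushed at each blank line; B instead parses all numbers into one flat list, records only the run length of each blank-terminated group, and reshapes the flat list into groups by slicing.
import Mathlib
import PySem

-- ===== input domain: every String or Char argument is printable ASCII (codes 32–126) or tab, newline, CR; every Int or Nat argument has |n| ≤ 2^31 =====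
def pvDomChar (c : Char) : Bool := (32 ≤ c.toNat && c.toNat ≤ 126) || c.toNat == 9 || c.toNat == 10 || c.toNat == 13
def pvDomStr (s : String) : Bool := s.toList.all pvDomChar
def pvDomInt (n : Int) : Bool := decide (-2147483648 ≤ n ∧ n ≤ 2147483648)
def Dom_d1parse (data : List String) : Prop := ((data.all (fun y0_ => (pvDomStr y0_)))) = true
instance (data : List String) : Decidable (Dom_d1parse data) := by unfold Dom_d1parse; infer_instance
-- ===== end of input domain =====

-- B differs from A by algorithm: A makes one pass holding the current group's parsed
-- values in an accumulator flushed at each blank line; B parses all numbers into one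
-- flat list, records each group's run length, and reshapes the flat list by slicing.

-- ===== PORT A =====
-- int(line); Pre_d1parse guarantees the parse succeeds on every non-blank line
def pyInt (s : String) : Int := (PySem.Int.ofStr? s).getD 0

def d1parse (data : List String) : List (List Int) :=
  (data.foldl
    (fun (st : List (List Int) × List Int) line =>
      if line ≠ "" then (st.1, st.2 ++ [pyInt line])
      else (st.1 ++ [st.2], []))
    ([], [])).1

-- ===== PORT B =====
def d1parse_alt (data : List String) : List (List Int) :=
  let nums := (data.filter (fun l => l != "")).map pyInt
  let sizes := (data.foldl
      (fun (st : List Nat × Nat) l =>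
        if l = "" then (st.1 ++ [st.2], 0) else (st.1, st.2 + 1))
      ([], 0)).1
  (sizes.foldl
      (fun (st : List (List Int) × Nat) (s : Nat) =>
        (st.1 ++ [PySem.List.slice nums (some (st.2 : Int)) (some ((st.2 : Int) + (s : Int)))],
         st.2 + s))
      ([], 0)).1

-- ===== PRECONDITION & SPEC =====
-- Pre_ excludes exactly the inputs where Python A raises ValueError: a non-blank
-- line that int() cannot parse (B raises there too).
def Pre_d1parse (data : List String) : Prop :=
  ∀ line ∈ data, line = "" ∨ (PySem.Int.ofStr? line).isSome = true
instance (data : List String) : Decidable (Pre_d1parse data) := by unfold Pre_d1parse; infer_instance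

def pvWitness_d1parse : List String := ["1", "2", "", " -3 ", "", ""]

def Spec_d1parse (data : List String) (out : List (List Int)) : Prop := out = d1parse_alt data
instance (data : List String) (out : List (List Int)) : Decidable (Spec_d1parse data out) := by unfold Spec_d1parse; infer_instance

-- ===== CLAIM (what is proved, stated in full; the proofs are below) =====
def Claim_equal_d1parse : Prop := ∀ (data : List String), Dom_d1parse data → Pre_d1parse data → Spec_d1parse data (d1parse data)

-- ===== LEMMAS AND PROOFS =====

-- the parsed numbers of all non-blank lines, in order (B's `nums`)
def numsOf (data : List String) : List Int :=
  (data.filter (fun l => l != "")).map pyInt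

-- A's loop as a structural recursion on the remaining lines
def hRec (elf : List Int) : List String → List (List Int)
  | [] => []
  | l :: r => if l = "" then elf :: hRec [] r else hRec (elf ++ [pyInt l]) r

-- B's run-length loop as a structural recursion
def sizesRec (run : Nat) : List String → List Nat
  | [] => []
  | l :: r => if l = "" then run :: sizesRec 0 r else sizesRec (run + 1) r

-- B's reshape loop as a structural recursion (slices written as drop/take)
def reshapeRec (nums : List Int) (pos : Nat) : List Nat → List (List Int)
  | [] => []
  | s :: ss => ((nums.drop pos).take s) :: reshapeRec nums (pos + s) ss

lemma foldA_eq (data : List String) :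
    ∀ (elves : List (List Int)) (elf : List Int),
      (data.foldl
        (fun (st : List (List Int) × List Int) line =>
          if line ≠ "" then (st.1, st.2 ++ [pyInt line])
          else (st.1 ++ [st.2], []))
        (elves, elf)).1 = elves ++ hRec elf data := by
  induction data with
  | nil => intro elves elf; simp [hRec]
  | cons l rest ih =>
      intro elves elf
      by_cases hl : l = ""
      · subst hl
        have hstep :
            (if ("" : String) ≠ "" then (elves, elf ++ [pyInt ""]) else (elves ++ [elf], ([] : List Int)))
              = (elves ++ [elf], ([] : List Int)) := by simp
        simp only [List.foldl_cons, hstep]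
        rw [ih (elves ++ [elf]) [], hRec]
        simp
      · simp only [List.foldl_cons, if_pos hl]
        rw [ih elves (elf ++ [pyInt l]), hRec]
        simp [hl]

lemma foldS_eq (data : List String) :
    ∀ (sizes : List Nat) (run : Nat),
      (data.foldl
        (fun (st : List Nat × Nat) l =>
          if l = "" then (st.1 ++ [st.2], 0) else (st.1, st.2 + 1))
        (sizes, run)).1 = sizes ++ sizesRec run data := by
  induction data with
  | nil => intro sizes run; simp [sizesRec]
  | cons l rest ih =>
      intro sizes run
      by_cases hl : l = ""
      · subst hl
        simp only [List.foldl_cons, reduceIte]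
        rw [ih (sizes ++ [run]) 0, sizesRec]
        simp
      · simp only [List.foldl_cons, if_neg hl]
        rw [ih sizes (run + 1), sizesRec]
        simp [hl]

lemma foldR_eq (nums : List Int) (sizes : List Nat) :
    ∀ (res : List (List Int)) (pos : Nat),
      (sizes.foldl
        (fun (st : List (List Int) × Nat) (s : Nat) =>
          (st.1 ++ [PySem.List.slice nums (some (st.2 : Int)) (some ((st.2 : Int) + (s : Int)))],
           st.2 + s))
        (res, pos)).1 = res ++ reshapeRec nums pos sizes := by
  induction sizes with
  | nil => intro res pos; simp [reshapeRec]
  | cons s ss ih =>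
      intro res pos
      simp only [List.foldl_cons]
      rw [ih (res ++ [PySem.List.slice nums (some (pos : Int)) (some ((pos : Int) + (s : Int)))]) (pos + s)]
      rw [PySem.List.slice_natCast_add, reshapeRec]
      simp

-- the key invariant: A's accumulator recursion equals B's reshape of the flat list
lemma hRec_eq_reshape (data : List String) :
    ∀ (done elf : List Int),
      hRec elf data = reshapeRec (done ++ elf ++ numsOf data) done.length (sizesRec elf.length data) := by
  induction data with
  | nil => intro done elf; simp [hRec, sizesRec, reshapeRec]
  | cons l rest ih =>
      intro done elf
      by_cases hl : l = ""
      · subst hl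
        rw [hRec, if_pos rfl, sizesRec, if_pos rfl, reshapeRec]
        have hnums : numsOf ("" :: rest) = numsOf rest := by simp [numsOf]
        have hslice :
            (((done ++ elf ++ numsOf rest).drop done.length).take elf.length) = elf := by
          rw [List.append_assoc, List.drop_left, List.take_left]
        rw [hnums, hslice]
        have := ih (done ++ elf) []
        simp only [List.append_nil, List.length_append, List.length_nil] at this ⊢
        rw [this]
      · rw [hRec, if_neg hl, sizesRec, if_neg hl]
        have hnums : numsOf (l :: rest) = pyInt l :: numsOf rest := by simp [numsOf, hl]
        rw [hnums]
        have := ih done (elf ++ [pyInt l])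
        simp only [List.length_append, List.length_cons, List.length_nil] at this
        rw [this]
        simp [List.append_assoc]

-- ===== VERDICT (by name: the statement is the Claim_ definition above) =====
theorem d1parse_spec : Claim_equal_d1parse := by
  intro data _ _
  unfold Spec_d1parse d1parse d1parse_alt
  rw [foldA_eq data [] []]
  rw [foldS_eq data [] 0]
  simp only [List.nil_append]
  rw [foldR_eq ((data.filter (fun l => l != "")).map pyInt) (sizesRec 0 data) [] 0]
  simpa [numsOf] using hRec_eq_reshape data [] []
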